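-- pv_equiv track=rewrite | github.com/dzinishu/ivanov_egor_BI2-1 | graf/main.py | find_best_warehouse_vertex
-- ===== SOURCE A (Python) =====
-- def find_best_warehouse_vertex(
--     dist_matrix: list[list[int]],
-- ) -> tuple[int, int, list[int]]:
--     sums: list[int] = []
--     best_vertex = -1
--     best_sum = -1
--
--     for i, row in enumerate(dist_matrix):
--         total = sum(row)
--         sums.append(total)
--
--         if best_vertex == -1 or total < best_sum:
--             best_vertex = i
--             best_sum = total
--
--     return best_vertex, best_sum, sums
-- ===== SOURCE B (Python) =====
-- def find_best_warehouse_vertex(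
--     dist_matrix: list[list[int]],
-- ) -> tuple[int, int, list[int]]:
--     sums = [sum(row) for row in dist_matrix]
--     order = sorted(range(len(sums)), key=lambda i: sums[i])
--     if not order:
--         return -1, -1, sums
--     best_vertex = order[0]
--     return best_vertex, sums[best_vertex], sums
-- ===== Notes on version B (the rewrite author's own statement) =====
-- stated objective: alternative
-- what changed: Replaces A's fused accumulate-and-track loop with a sort-based selection: build the sums table, stably sort the index list by row sum, and read the best vertex off the first sorted index (stability gives A's keep-the-first tie-break).
import Mathlib
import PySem

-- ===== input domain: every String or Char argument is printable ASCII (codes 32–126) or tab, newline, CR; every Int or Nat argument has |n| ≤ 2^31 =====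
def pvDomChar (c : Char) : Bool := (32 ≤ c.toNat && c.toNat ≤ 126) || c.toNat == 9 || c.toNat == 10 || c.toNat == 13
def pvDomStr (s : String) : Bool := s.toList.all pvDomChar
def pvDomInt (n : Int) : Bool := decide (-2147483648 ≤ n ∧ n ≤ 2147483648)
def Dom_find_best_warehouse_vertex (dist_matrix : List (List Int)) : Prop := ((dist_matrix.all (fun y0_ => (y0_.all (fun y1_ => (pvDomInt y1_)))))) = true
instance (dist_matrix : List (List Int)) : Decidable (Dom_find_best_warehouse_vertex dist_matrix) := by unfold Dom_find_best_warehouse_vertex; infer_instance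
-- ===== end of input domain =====

-- B replaces A's fused accumulate-and-track loop by a sort-based selection: build the sums
-- table, stably sort the index list by row sum, and read the answer off the first index
-- (a genuinely different, sorting-based algorithm of similar cost; not claimed faster).


-- ===== PORT A =====
-- A: fused loop over enumerate(dist_matrix), appending each row sum and tracking the best
def goA_find_best : Int → Int → Int → List Int → List (List Int) → Int × Int × List Int
  | _, best_vertex, best_sum, sums, [] => (best_vertex, best_sum, sums)
  | i, best_vertex, best_sum, sums, row :: rest =>
      let total := row.sum
      let sums' := sums ++ [total]
      if best_vertex = -1 ∨ total < best_sum then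
        goA_find_best (i + 1) i total sums' rest
      else
        goA_find_best (i + 1) best_vertex best_sum sums' rest

def find_best_warehouse_vertex (dist_matrix : List (List Int)) : Int × Int × List Int :=
  goA_find_best 0 (-1) (-1) [] dist_matrix

-- ===== PORT B =====
-- B: sums table, then sorted(range(len(sums)), key=lambda i: sums[i]) and order[0].
-- Every i drawn from range(len(sums)) is in range, so sums[i] is pyGetD (total form).
def find_best_warehouse_vertex_alt (dist_matrix : List (List Int)) : Int × Int × List Int :=
  let sums := dist_matrix.map List.sum
  let order := PySem.List.sorted (PySem.List.pyRange 0 (PySem.List.len sums) 1)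
                 (fun i => PySem.List.pyGetD sums i 0) false
  match order with
  | [] => (-1, -1, sums)
  | v :: _ => (v, PySem.List.pyGetD sums v 0, sums)

-- ===== PRECONDITION & SPEC =====
def Spec_find_best_warehouse_vertex (dist_matrix : List (List Int)) (out : Int × Int × List Int) : Prop := out = find_best_warehouse_vertex_alt dist_matrix
instance (dist_matrix : List (List Int)) (out : Int × Int × List Int) : Decidable (Spec_find_best_warehouse_vertex dist_matrix out) := by unfold Spec_find_best_warehouse_vertex; infer_instance

-- ===== CLAIM (what is proved, stated in full; the proofs are below) =====
def Claim_equal_find_best_warehouse_vertex : Prop := ∀ (dist_matrix : List (List Int)), Dom_find_best_warehouse_vertex dist_matrix → Spec_find_best_warehouse_vertex dist_matrix (find_best_warehouse_vertex dist_matrix)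

-- ===== LEMMAS AND PROOFS =====

-- the invariant of A's loop: best_sum is the minimum of the sums so far,
-- best_vertex the index of its first occurrence
theorem goA_spec (rest : List (List Int)) :
    ∀ (acc : List Int) (bv : Nat) (bs : Int),
      PySem.List.index? acc bs = some bv →
      (∀ x ∈ acc, bs ≤ x) →
      goA_find_best (acc.length : Int) (bv : Int) bs acc rest =
        (match acc ++ rest.map List.sum with
         | [] => ((-1 : Int), (-1 : Int), ([] : List Int))
         | s :: r =>
             (((PySem.List.index? (s :: r) (r.foldl min s)).getD 0 : Nat),
              r.foldl min s, s :: r)) := by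
  induction rest with
  | nil =>
      intro acc bv bs hidx hle
      have hmem : bs ∈ acc := (PySem.List.index?_isSome_iff _ _).mp (by rw [hidx]; rfl)
      match acc, hidx with
      | s :: r, hidx =>
        have hlo : r.foldl min s ≤ bs := by
          rcases List.mem_cons.mp hmem with h | h
          · rw [h]; exact (PySem.List.foldl_min_le r s).1
          · exact (PySem.List.foldl_min_le r s).2 _ h
        have hhi : bs ≤ r.foldl min s := by
          rcases PySem.List.foldl_min_mem r s with h | h
          · rw [h]; exact hle _ List.mem_cons_self
          · exact hle _ (List.mem_cons_of_mem _ h)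
        have hmin : r.foldl min s = bs := le_antisymm hlo hhi
        rw [PySem.List.index?_eq_idxOf?] at hidx
        simp [goA_find_best, hmin, hidx]
  | cons row rest ih =>
      intro acc bv bs hidx hle
      have hbv : (bv : Int) ≠ -1 := by omega
      simp only [goA_find_best, hbv, false_or, List.map_cons]
      by_cases hlt : row.sum < bs
      · rw [if_pos hlt]
        have hnotin : row.sum ∉ acc := fun h => absurd (hle _ h) (by omega)
        have hidx' : PySem.List.index? (acc ++ [row.sum]) row.sum = some acc.length :=
          PySem.List.index?_append_singleton_self _ _ hnotin
        have hle' : ∀ x ∈ acc ++ [row.sum], row.sum ≤ x := by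
          intro x hx
          rcases List.mem_append.mp hx with h | h
          · exact le_of_lt (lt_of_lt_of_le hlt (hle _ h))
          · simp at h; omega
        have h2 := ih (acc ++ [row.sum]) acc.length row.sum hidx' hle'
        push_cast at h2
        simpa [List.append_assoc] using h2
      · rw [if_neg hlt]
        have hmem : bs ∈ acc := (PySem.List.index?_isSome_iff _ _).mp (by rw [hidx]; rfl)
        have hidx' : PySem.List.index? (acc ++ [row.sum]) bs = some bv := by
          rw [PySem.List.index?_append_of_mem _ hmem, hidx]
        have hle' : ∀ x ∈ acc ++ [row.sum], bs ≤ x := by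
          intro x hx
          rcases List.mem_append.mp hx with h | h
          · exact hle _ h
          · simp at h; omega
        have h2 := ih (acc ++ [row.sum]) bv bs hidx' hle'
        push_cast at h2
        simpa [List.append_assoc] using h2

-- the index list [k, …, k+m-1] as Ints (proof-side view of pyRange's tail)
def intRange' (k m : Nat) : List Int := (List.range' k m).map (fun j : Nat => (j : Int))

theorem intRange'_zero (k : Nat) : intRange' k 0 = [] := rfl

theorem intRange'_succ (k m : Nat) : intRange' k (m + 1) = ((k : Nat) : Int) :: intRange' (k + 1) m := by
  simp [intRange', List.range'_succ]

-- head of an insertBy step: B's insertion sort moves the head only on a strictly smaller key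
theorem head?_insertBy (key : Int → Int) (x h : Int) (acc : List Int)
    (hh : acc.head? = some h) :
    (PySem.List.insertBy (fun a b => decide (key a < key b)) x acc).head?
      = some (if key x < key h then x else h) := by
  cases acc with
  | nil => simp at hh
  | cons y ys =>
      simp only [List.head?_cons, Option.some.injEq] at hh
      rw [← hh]
      by_cases hc : key x < key y
      · simp [PySem.List.insertBy, hc]
      · simp [PySem.List.insertBy, hc]

-- the head of B's insertion-sort fold is the keep-the-first running argmin
theorem head?_foldl_insertBy (key : Int → Int) (l : List Int) :
    ∀ (acc : List Int) (h : Int), acc.head? = some h →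
      (l.foldl (fun a x => PySem.List.insertBy (fun a b => decide (key a < key b)) x a) acc).head?
        = some (l.foldl (fun a x => if key x < key a then x else a) h) := by
  induction l with
  | nil => intro acc h hh; simpa using hh
  | cons x l ih =>
      intro acc h hh
      simp only [List.foldl_cons]
      exact ih _ _ (head?_insertBy key x h acc hh)

-- the running argmin over the remaining indices lands on the first global argmin
theorem argmin_fold (sums : List Int) (m : Nat) :
    ∀ (k hf : Nat), k + m = sums.length → hf < k →
      PySem.List.index? (sums.take k) (sums.getD hf 0) = some hf →
      (∀ j, j < k → sums.getD hf 0 ≤ sums.getD j 0) →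
      ∃ g : Nat,
        (intRange' k m).foldl
            (fun a x => if PySem.List.pyGetD sums x 0 < PySem.List.pyGetD sums a 0 then x else a)
            ((hf : Nat) : Int)
          = ((g : Nat) : Int) ∧
        PySem.List.index? sums (sums.getD g 0) = some g ∧
        (∀ j, j < sums.length → sums.getD g 0 ≤ sums.getD j 0) := by
  induction m with
  | zero =>
      intro k hf hk hfk hidx hmin
      refine ⟨hf, by simp [intRange'_zero], ?_, ?_⟩
      · have : k = sums.length := by omega
        rwa [this, List.take_length] at hidx
      · intro j hj; exact hmin j (by omega)
  | succ m ih =>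
      intro k hf hk hfk hidx hmin
      have hklen : k < sums.length := by omega
      rw [intRange'_succ, List.foldl_cons]
      have hgk : PySem.List.pyGetD sums ((k : Nat) : Int) 0 = sums.getD k 0 := by
        simp [PySem.List.pyGetD_natCast]
      have hghf : PySem.List.pyGetD sums ((hf : Nat) : Int) 0 = sums.getD hf 0 := by
        simp [PySem.List.pyGetD_natCast]
      have htake : sums.take (k+1) = sums.take k ++ [sums[k]] := by
        rw [List.take_add_one, List.getElem?_eq_getElem hklen]; rfl
      have hgdk : sums.getD k 0 = sums[k] := List.getD_eq_getElem sums 0 hklen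
      rw [hgk, hghf]
      by_cases hlt : sums.getD k 0 < sums.getD hf 0
      · rw [if_pos hlt]
        refine ih (k+1) k (by omega) (by omega) ?_ ?_
        · have hnotin : sums[k] ∉ sums.take k := by
            intro hmem
            obtain ⟨i, hi, hival⟩ := List.mem_iff_getElem.mp hmem
            have hik : i < k := by
              have := List.length_take (i := k) (l := sums); omega
            have hm := hmin i (by omega)
            rw [List.getElem_take] at hival
            have hgdi : sums.getD i 0 = sums[i] :=
              List.getD_eq_getElem sums 0 (show i < sums.length by omega)
            rw [hgdi, hival, ← hgdk] at hm
            omega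
          have hidx1 := PySem.List.index?_append_singleton_self (sums.take k) sums[k] hnotin
          rw [htake, hgdk, hidx1, List.length_take]
          congr 1; omega
        · intro j hj
          rcases Nat.lt_succ_iff_lt_or_eq.mp hj with h | h
          · exact le_trans (le_of_lt hlt) (hmin j h)
          · subst h; exact le_refl _
      · rw [if_neg hlt]
        refine ih (k+1) hf (by omega) (by omega) ?_ ?_
        · have hmem : sums.getD hf 0 ∈ sums.take k :=
            (PySem.List.index?_isSome_iff _ _).mp (by rw [hidx]; rfl)
          rw [htake, PySem.List.index?_append_of_mem _ hmem, hidx]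
        · intro j hj
          rcases Nat.lt_succ_iff_lt_or_eq.mp hj with h | h
          · exact hmin j h
          · subst h; omega

-- ===== VERDICT (by name: the statement is the Claim_ definition above) =====
theorem find_best_warehouse_vertex_spec : Claim_equal_find_best_warehouse_vertex := by
  intro dist_matrix _
  unfold Spec_find_best_warehouse_vertex
  cases dist_matrix with
  | nil => rfl
  | cons row rest =>
      set s := row.sum with hs
      set r := rest.map List.sum with hr
      have hsums : (row :: rest).map List.sum = s :: r := by simp [hs, hr]
      -- ===== A's value =====
      have hA := goA_spec rest [s] 0 s (PySem.List.index?_cons_self _ _)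
        (by intro x hx; simp at hx; omega)
      push_cast at hA
      simp only [List.length_cons, List.length_nil, List.singleton_append] at hA
      rw [← hr] at hA
      -- ===== B's value =====
      have hlen : PySem.List.len (s :: r) = ((r.length + 1 : Nat) : Int) := by
        simp [PySem.List.len_eq]
      have hrange : PySem.List.pyRange 0 (((r.length + 1 : Nat) : Int)) 1
          = (0 : Int) :: intRange' 1 r.length := by
        rw [PySem.List.pyRange_zero_natCast, List.range_eq_range', List.range'_succ]
        simp [intRange']
      obtain ⟨g, hfold, hgidx, hgmin⟩ := argmin_fold (s :: r) r.length 1 0 (by simp [Nat.add_comm]) (by omega)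
        (by simp) (by intro j hj; interval_cases j; simp)
      rw [Nat.cast_zero] at hfold
      have hglen : g < (s :: r).length := by
        obtain ⟨hk, _, _⟩ := PySem.List.getElem_of_index?_eq_some hgidx; exact hk
      -- the first index of the stable sort
      have hhead : (PySem.List.sorted (PySem.List.pyRange 0 (PySem.List.len (s :: r)) 1)
            (fun i => PySem.List.pyGetD (s :: r) i 0) false).head? = some ((g : Nat) : Int) := by
        rw [hlen, hrange, PySem.List.sorted_eq_foldl_insertBy, List.foldl_cons]
        have h0 : (PySem.List.insertBy
            (fun a b => decide (PySem.List.pyGetD (s :: r) a 0 < PySem.List.pyGetD (s :: r) b 0))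
            (0 : Int) ([] : List Int)).head? = some (0 : Int) := rfl
        rw [head?_foldl_insertBy _ _ _ 0 h0, hfold]
      -- the minimising value is the fold-min, and g its first index
      have hM : (s :: r).getD g 0 = r.foldl min s := by
        have hsel : (s :: r).getD g 0 = (s :: r)[g] := List.getD_eq_getElem _ 0 hglen
        have hlo : r.foldl min s ≤ (s :: r).getD g 0 := by
          rw [hsel]
          rcases List.mem_cons.mp (List.getElem_mem hglen) with h | h
          · rw [h]; exact (PySem.List.foldl_min_le r s).1
          · exact (PySem.List.foldl_min_le r s).2 _ h
        have hhi : (s :: r).getD g 0 ≤ r.foldl min s := by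
          have hmem : r.foldl min s ∈ s :: r := by
            rcases PySem.List.foldl_min_mem r s with h | h
            · rw [h]; exact List.mem_cons_self
            · exact List.mem_cons_of_mem _ h
          obtain ⟨j, hj, hjval⟩ := List.mem_iff_getElem.mp hmem
          have hm := hgmin j hj
          rw [List.getD_eq_getElem _ 0 hj, hjval] at hm
          exact hm
        exact le_antisymm hhi hlo
      have hidxM : PySem.List.index? (s :: r) (r.foldl min s) = some g := hM ▸ hgidx
      have hget : PySem.List.pyGetD (s :: r) ((g : Nat) : Int) 0 = r.foldl min s := by
        rw [PySem.List.pyGetD_natCast]; exact hM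
      -- order is nonempty with head g
      obtain ⟨t, ht⟩ : ∃ t, (PySem.List.sorted (PySem.List.pyRange 0 (PySem.List.len (s :: r)) 1)
          (fun i => PySem.List.pyGetD (s :: r) i 0) false) = ((g : Nat) : Int) :: t := by
        cases hord : (PySem.List.sorted (PySem.List.pyRange 0 (PySem.List.len (s :: r)) 1)
            (fun i => PySem.List.pyGetD (s :: r) i 0) false) with
        | nil => rw [hord] at hhead; simp at hhead
        | cons a t => rw [hord] at hhead; simp at hhead; exact ⟨t, by rw [hhead]⟩
      -- ===== put the two sides together =====
      unfold find_best_warehouse_vertex find_best_warehouse_vertex_alt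
      simp only [hsums]
      rw [ht]
      simp only [hget]
      simp only [goA_find_best]
      rw [if_pos (Or.inl trivial)]
      norm_num at hA ⊢
      rw [hA]
      rw [PySem.List.index?_eq_idxOf?] at hidxM
      rw [hidxM]
      rfl
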